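-- pv_equiv track=rewrite | github.com/kingkaushalagarwal/100daysofcoding | Codechef/OCT20B/POSAND.py | check
-- ===== SOURCE A (Python) =====
-- def check(num):
--     n = num
--     if n==1:
--         return True
--     count =0
--     while n>0:
--         if n&1==1:
--             count+=1
--         n= n>>1
--     if count>1:
--         return True
--     else:
--         return False
-- ===== SOURCE B (Python) =====
-- def check(num):
--     return num > 0 and (num == 1 or (num & (num - 1)) != 0)
-- ===== Notes on version B (the rewrite author's own statement) =====
-- stated objective: simpler
-- what changed: Replaces the per-bit counting loop with the constant-time power-of-two bit trick num & (num-1), keeping A's special cases for one and for non-positive inputs.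
import Mathlib
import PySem

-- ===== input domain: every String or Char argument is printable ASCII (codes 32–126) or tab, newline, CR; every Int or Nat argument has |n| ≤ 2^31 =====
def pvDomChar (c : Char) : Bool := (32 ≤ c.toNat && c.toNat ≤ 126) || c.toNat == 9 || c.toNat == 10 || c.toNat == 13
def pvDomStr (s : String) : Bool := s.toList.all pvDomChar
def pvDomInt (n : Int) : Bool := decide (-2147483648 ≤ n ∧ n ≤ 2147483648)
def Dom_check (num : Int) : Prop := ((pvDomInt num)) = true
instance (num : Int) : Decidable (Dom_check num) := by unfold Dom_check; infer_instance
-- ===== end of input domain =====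

-- B replaces A's per-bit counting loop with the `num & (num-1)` power-of-two bit trick
-- (simpler: a one-line closed form instead of a loop over the bits).

-- ===== PORT A =====
-- the `while n>0` loop of A: carries (n, count); `n>>1` is `>>> 1` (arithmetic shift, Python-exact),
-- `n&1` is PySem.Int.band (Python-exact bitwise and)
def checkLoop (n : Int) (count : Int) : Int :=
  if h : n > 0 then
    checkLoop (n >>> (1 : Nat)) (if PySem.Int.band n 1 = 1 then count + 1 else count)
  else count
termination_by n.toNat
decreasing_by
  have : n >>> (1 : Nat) = n / 2 := by rw [Int.shiftRight_eq_div_pow]; norm_num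
  omega

def check (num : Int) : Bool :=
  if num = 1 then true
  else if checkLoop num 0 > 1 then true else false

-- ===== PORT B =====
def check_alt (num : Int) : Bool :=
  decide (num > 0) && (decide (num = 1) || decide (PySem.Int.band num (num - 1) ≠ 0))

-- ===== PRECONDITION & SPEC =====
def Spec_check (num : Int) (out : Bool) : Prop := out = check_alt num
instance (num : Int) (out : Bool) : Decidable (Spec_check num out) := by unfold Spec_check; infer_instance

-- ===== CLAIM (what is proved, stated in full; the proofs are below) =====
def Claim_equal_check : Prop := ∀ (num : Int), Dom_check num → Spec_check num (check num)

-- ===== LEMMAS AND PROOFS =====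

-- popcount by the same halving scheme as A's loop, on Nat
def natCount (n : Nat) : Nat :=
  if n = 0 then 0 else natCount (n / 2) + n % 2

theorem checkLoop_nonpos (n count : Int) (h : ¬ n > 0) : checkLoop n count = count := by
  rw [checkLoop.eq_def]; simp [h]

theorem checkLoop_natCast (n : Nat) (count : Int) :
    checkLoop (n : Int) count = count + (natCount n : Int) := by
  induction n using Nat.strong_induction_on generalizing count with
  | _ n ih =>
    rw [checkLoop.eq_def, natCount]
    by_cases h0 : n = 0
    · simp [h0]
    · have hpos : (0 : Int) < (n : Int) := by exact_mod_cast Nat.pos_of_ne_zero h0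
      have hshift : ((n : Int) >>> (1 : Nat)) = ((n / 2 : Nat) : Int) := by
        have : ((n : Int) >>> (1 : Nat)) = (n : Int) / 2 := by rw [Int.shiftRight_eq_div_pow]; norm_num
        rw [this]; omega
      have hband : PySem.Int.band (n : Int) 1 = ((n &&& 1 : Nat) : Int) :=
        (PySem.Int.band_natCast n 1).symm ▸ rfl
      have hmod : n &&& 1 = n % 2 := Nat.and_one_is_mod n
      simp only [hpos, if_pos, dite_eq_ite, hshift, hband, hmod, h0, if_false,
        ih (n / 2) (Nat.div_lt_self (Nat.pos_of_ne_zero h0) one_lt_two)]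
      by_cases hp : n % 2 = 1
      · simp only [hp, if_pos, Nat.cast_add, Nat.cast_one]; ring
      · have hq : n % 2 = 0 := by omega
        simp only [hq]; push_cast; ring

theorem natCount_pos (n : Nat) (h : 1 ≤ n) : 1 ≤ natCount n := by
  induction n using Nat.strong_induction_on with
  | _ n ih =>
    rw [natCount]
    have h0 : n ≠ 0 := by omega
    simp only [h0, if_false]
    by_cases hp : n % 2 = 1
    · omega
    · have h2 : 1 ≤ n / 2 := by omega
      have := ih (n / 2) (by omega) h2
      omega

theorem bit_land_lemma_even (m : Nat) (h : 1 ≤ m) :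
    (2 * m) &&& (2 * m - 1) = 2 * (m &&& (m - 1)) := by
  have h1 : 2 * m = Nat.bit false m := by simp [Nat.bit]
  have h2 : 2 * m - 1 = Nat.bit true (m - 1) := by simp [Nat.bit]; omega
  have h3 : 2 * (m &&& (m - 1)) = Nat.bit false (m &&& (m - 1)) := by simp [Nat.bit]
  rw [h2, h1, h3, Nat.land_bit]; simp

theorem bit_land_lemma_odd (m : Nat) :
    (2 * m + 1) &&& (2 * m) = 2 * m := by
  have h1 : 2 * m + 1 = Nat.bit true m := by simp [Nat.bit]
  have h2 : 2 * m = Nat.bit false m := by simp [Nat.bit]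
  calc Nat.bit true m &&& Nat.bit false m = Nat.bit false (m &&& m) := Nat.land_bit true m false m
    _ = 2 * m := by simp [Nat.bit, Nat.and_self]

-- for n ≥ 1: the loop count is 1 exactly when n & (n-1) = 0 (n a power of two)
theorem natCount_one_iff (n : Nat) (h : 1 ≤ n) :
    (natCount n = 1 ↔ n &&& (n - 1) = 0) := by
  induction n using Nat.strong_induction_on with
  | _ n ih =>
    rw [natCount]
    have h0 : n ≠ 0 := by omega
    simp only [h0, if_false]
    by_cases hp : n % 2 = 1
    · by_cases h1 : n = 1
      · subst h1; simp [natCount]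
      · -- n = 2*m+1 with m ≥ 1
        have hm : n = 2 * (n / 2) + 1 := by omega
        have hm1 : 1 ≤ n / 2 := by omega
        have hland : n &&& (n - 1) = 2 * (n / 2) := by
          calc n &&& (n - 1) = (2 * (n / 2) + 1) &&& (2 * (n / 2)) := by rw [← hm]; congr 1; omega
            _ = 2 * (n / 2) := bit_land_lemma_odd (n / 2)
        have := natCount_pos (n / 2) hm1
        constructor
        · intro hc; omega
        · intro hc; rw [hland] at hc; omega
    · -- n = 2*m with m ≥ 1
      have hp0 : n % 2 = 0 := by omega
      have hm : n = 2 * (n / 2) := by omega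
      have hm1 : 1 ≤ n / 2 := by omega
      have hland : n &&& (n - 1) = 2 * ((n / 2) &&& (n / 2 - 1)) := by
        calc n &&& (n - 1) = (2 * (n / 2)) &&& (2 * (n / 2) - 1) := by rw [← hm]
          _ = 2 * ((n / 2) &&& (n / 2 - 1)) := bit_land_lemma_even (n / 2) hm1
      have hih := ih (n / 2) (by omega) hm1
      rw [hland, hp0, Nat.add_zero]
      constructor
      · intro hc; have := hih.mp hc; omega
      · intro hc; exact hih.mpr (by omega)

-- ===== VERDICT (by name: the statement is the Claim_ definition above) =====
theorem check_spec : Claim_equal_check := by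
  intro num _
  unfold Spec_check check check_alt
  by_cases hpos : num > 0
  · by_cases h1 : num = 1
    · simp [h1]
    · -- num ≥ 2
      have h2 : 2 ≤ num := by omega
      obtain ⟨m, rfl⟩ : ∃ m : Nat, num = (m : Int) := ⟨num.toNat, by omega⟩
      have hm2 : 2 ≤ m := by exact_mod_cast h2
      have hcast : ((m : Int)) - 1 = ((m - 1 : Nat) : Int) := by push_cast [Nat.cast_sub (by omega : 1 ≤ m)]; ring
      have hband : PySem.Int.band (m : Int) ((m : Int) - 1) = ((m &&& (m - 1) : Nat) : Int) := by
        rw [hcast]; simp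
      have hloop := checkLoop_natCast m 0
      have hiff := natCount_one_iff m (by omega)
      have hposn := natCount_pos m (by omega)
      simp only [hloop, zero_add, h1, if_false, hband]
      by_cases hz : m &&& (m - 1) = 0
      · have : natCount m = 1 := hiff.mpr hz
        simp [this, hz]
      · have : natCount m ≠ 1 := fun hc => hz (hiff.mp hc)
        have hgt : (1 : Int) < (natCount m : Int) := by exact_mod_cast (by omega : 1 < natCount m)
        have hnz : ((m &&& (m - 1) : Nat) : Int) ≠ 0 := by exact_mod_cast hz
        simp [hgt, hz]; omega
  · have hloop := checkLoop_nonpos num 0 hpos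
    have h1 : num ≠ 1 := by omega
    simp [hloop, h1, hpos]
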